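-- pv_equiv track=rewrite | github.com/AzRea7/onehaven | onehaven_decision_engine/backend/app/services/policy_projection_service.py | _document_rule_keys
-- ===== SOURCE A (Python) =====
-- from typing import Any, Iterable, Optional
--
-- DOCUMENT_CATEGORY_RULE_MAP = {
--     "inspection_report": ["pass_inspection_required", "inspection_required"],
--     "pass_certificate": ["certificate_required_before_occupancy", "pass_inspection_required"],
--     "reinspection_notice": ["inspection_required", "reinspection_required"],
--     "repair_invoice": ["inspection_required"],
--     "utility_confirmation": ["utility_confirmation_required"],
--     "smoke_detector_proof": ["smoke_detector_required"],
--     "lead_based_paint_paperwork": ["lead_based_paint_paperwork_required"],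
--     "local_jurisdiction_document": ["local_jurisdiction_document_required", "rental_registration_required"],
--     "approval_letter": ["certificate_required_before_occupancy"],
--     "denial_letter": ["inspection_required"],
--     "photo_evidence": ["inspection_required"],
--     "registration_certificate": ["rental_registration_required"],
--     "certificate_of_occupancy": ["certificate_of_occupancy_required", "certificate_required_before_occupancy"],
--     "certificate_of_compliance": ["certificate_of_compliance_required", "certificate_required_before_occupancy"],
--     "other_evidence": [],
-- }
--
-- def _document_rule_keys(category: str, metadata: dict[str, Any] | None = None, extracted_text: str | None = None) -> list[str]:
--     out = list(DOCUMENT_CATEGORY_RULE_MAP.get(str(category or "other_evidence"), []))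
--     joined = " ".join(
--         [
--             str(category or ""),
--             str((metadata or {}).get("label") or ""),
--             str(extracted_text or ""),
--         ]
--     ).lower()
--     if "registration" in joined:
--         out.append("rental_registration_required")
--     if "certificate" in joined or "occupancy" in joined:
--         out.extend(
--             [
--                 "certificate_required_before_occupancy",
--                 "certificate_of_occupancy_required",
--                 "certificate_of_compliance_required",
--             ]
--         )
--     if "utility" in joined:
--         out.append("utility_confirmation_required")
--     if "lead" in joined:
--         out.extend(["lead_based_paint_paperwork_required", "lead_clearance_required"])
--     if "smoke" in joined:
--         out.append("smoke_detector_required")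
--     if "carbon monoxide" in joined or "co detector" in joined:
--         out.append("carbon_monoxide_detector_required")
--     if "inspect" in joined:
--         out.append("inspection_required")
--     return sorted({key for key in out if key})
-- ===== SOURCE B (Python) =====
-- DOCUMENT_CATEGORY_RULE_MAP = {
--     "inspection_report": ["pass_inspection_required", "inspection_required"],
--     "pass_certificate": ["certificate_required_before_occupancy", "pass_inspection_required"],
--     "reinspection_notice": ["inspection_required", "reinspection_required"],
--     "repair_invoice": ["inspection_required"],
--     "utility_confirmation": ["utility_confirmation_required"],
--     "smoke_detector_proof": ["smoke_detector_required"],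
--     "lead_based_paint_paperwork": ["lead_based_paint_paperwork_required"],
--     "local_jurisdiction_document": ["local_jurisdiction_document_required", "rental_registration_required"],
--     "approval_letter": ["certificate_required_before_occupancy"],
--     "denial_letter": ["inspection_required"],
--     "photo_evidence": ["inspection_required"],
--     "registration_certificate": ["rental_registration_required"],
--     "certificate_of_occupancy": ["certificate_of_occupancy_required", "certificate_required_before_occupancy"],
--     "certificate_of_compliance": ["certificate_of_compliance_required", "certificate_required_before_occupancy"],
--     "other_evidence": [],
-- }
--
--
-- def _document_rule_keys(category, metadata=None, extracted_text=None):
--     # Output-driven: walk the pre-sorted universe of rule keys once and keep each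
--     # key whose text trigger fires or which belongs to the category's base rules.
--     base = DOCUMENT_CATEGORY_RULE_MAP.get(str(category or "other_evidence"), [])
--     joined = " ".join(
--         [
--             str(category or ""),
--             str((metadata or {}).get("label") or ""),
--             str(extracted_text or ""),
--         ]
--     ).lower()
--     cert = "certificate" in joined or "occupancy" in joined
--     rules = [
--         ("carbon_monoxide_detector_required", "carbon monoxide" in joined or "co detector" in joined),
--         ("certificate_of_compliance_required", cert),
--         ("certificate_of_occupancy_required", cert),
--         ("certificate_required_before_occupancy", cert),
--         ("inspection_required", "inspect" in joined),
--         ("lead_based_paint_paperwork_required", "lead" in joined),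
--         ("lead_clearance_required", "lead" in joined),
--         ("local_jurisdiction_document_required", False),
--         ("pass_inspection_required", False),
--         ("reinspection_required", False),
--         ("rental_registration_required", "registration" in joined),
--         ("smoke_detector_required", "smoke" in joined),
--         ("utility_confirmation_required", "utility" in joined),
--     ]
--     return [key for key, hit in rules if hit or key in base]
-- ===== Notes on version B (the rewrite author's own statement) =====
-- stated objective: idiomatic
-- what changed: A appends keys per trigger into a working list and then dedups and sorts it; B walks a static, pre-sorted table of all rule keys once and keeps each key whose text trigger fires or which belongs to the category's base rules, so the dedup and the sort disappear.
import Mathlib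
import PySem

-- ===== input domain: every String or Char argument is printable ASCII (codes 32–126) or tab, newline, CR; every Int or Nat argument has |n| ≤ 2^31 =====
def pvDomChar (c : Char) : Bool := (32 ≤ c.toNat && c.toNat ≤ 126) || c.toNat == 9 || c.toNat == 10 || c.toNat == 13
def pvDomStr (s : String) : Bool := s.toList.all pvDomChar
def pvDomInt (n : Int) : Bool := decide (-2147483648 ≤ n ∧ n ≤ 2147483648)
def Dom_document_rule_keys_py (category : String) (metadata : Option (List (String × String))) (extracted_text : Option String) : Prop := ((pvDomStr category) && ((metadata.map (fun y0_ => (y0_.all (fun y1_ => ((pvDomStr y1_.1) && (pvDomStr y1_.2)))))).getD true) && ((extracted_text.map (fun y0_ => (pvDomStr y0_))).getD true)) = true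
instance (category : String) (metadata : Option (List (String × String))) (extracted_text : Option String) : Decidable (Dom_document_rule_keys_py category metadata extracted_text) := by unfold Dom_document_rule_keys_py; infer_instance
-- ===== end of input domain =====

-- B is a different decomposition of the same task: instead of A's append-then-dedup-then-sort
-- pipeline, B walks the pre-sorted universe of rule keys once, keeping each key whose trigger
-- fires or which lies in the category's base rules (objective: idiomatic; same cost).
-- String sorting/comparison is modelled on the char list (.toList key), exact for Python's
-- code-point lexicographic order on strings.

-- ===== PORT A =====
-- shared module constant DOCUMENT_CATEGORY_RULE_MAP (both Pythons read the same dict)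
def pvDocMap : PySem.Dict String (List String) := PySem.Dict.ofList [
  ("inspection_report", ["pass_inspection_required", "inspection_required"]),
  ("pass_certificate", ["certificate_required_before_occupancy", "pass_inspection_required"]),
  ("reinspection_notice", ["inspection_required", "reinspection_required"]),
  ("repair_invoice", ["inspection_required"]),
  ("utility_confirmation", ["utility_confirmation_required"]),
  ("smoke_detector_proof", ["smoke_detector_required"]),
  ("lead_based_paint_paperwork", ["lead_based_paint_paperwork_required"]),
  ("local_jurisdiction_document", ["local_jurisdiction_document_required", "rental_registration_required"]),
  ("approval_letter", ["certificate_required_before_occupancy"]),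
  ("denial_letter", ["inspection_required"]),
  ("photo_evidence", ["inspection_required"]),
  ("registration_certificate", ["rental_registration_required"]),
  ("certificate_of_occupancy", ["certificate_of_occupancy_required", "certificate_required_before_occupancy"]),
  ("certificate_of_compliance", ["certificate_of_compliance_required", "certificate_required_before_occupancy"]),
  ("other_evidence", [])]

-- DOCUMENT_CATEGORY_RULE_MAP.get(str(category or "other_evidence"), []) — identical line in A and B
def pvBase (category : String) : List String :=
  PySem.Dict.getD pvDocMap (if category == "" then "other_evidence" else category) []

-- " ".join([str(category or ""), str((metadata or {}).get("label") or ""), str(extracted_text or "")]).lower()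
-- identical line in A and B ('x or ""' on a string/None is "" for None/empty, else the string itself)
def pvJoined (category : String) (metadata : Option (List (String × String))) (extracted_text : Option String) : String :=
  PySem.Str.lower (PySem.Str.join " " [
    (if category == "" then "" else category),
    (match metadata with
     | none => ""
     | some md => (PySem.Dict.get? (PySem.Dict.mk md) "label").getD ""),
    extracted_text.getD ""])

def document_rule_keys_py (category : String) (metadata : Option (List (String × String))) (extracted_text : Option String) : List String :=
  let out := pvBase category
  let joined := pvJoined category metadata extracted_text
  let out := out ++ (if PySem.Str.isIn "registration" joined then ["rental_registration_required"] else [])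
  let out := out ++ (if PySem.Str.isIn "certificate" joined || PySem.Str.isIn "occupancy" joined then
      ["certificate_required_before_occupancy", "certificate_of_occupancy_required", "certificate_of_compliance_required"] else [])
  let out := out ++ (if PySem.Str.isIn "utility" joined then ["utility_confirmation_required"] else [])
  let out := out ++ (if PySem.Str.isIn "lead" joined then ["lead_based_paint_paperwork_required", "lead_clearance_required"] else [])
  let out := out ++ (if PySem.Str.isIn "smoke" joined then ["smoke_detector_required"] else [])
  let out := out ++ (if PySem.Str.isIn "carbon monoxide" joined || PySem.Str.isIn "co detector" joined then
      ["carbon_monoxide_detector_required"] else [])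
  let out := out ++ (if PySem.Str.isIn "inspect" joined then ["inspection_required"] else [])
  PySem.List.sorted (PySem.Set.ofList (out.filter (fun k => k != ""))) (fun x => x.toList) false

-- ===== PORT B =====
def document_rule_keys_py_alt (category : String) (metadata : Option (List (String × String))) (extracted_text : Option String) : List String :=
  let base := pvBase category
  let joined := pvJoined category metadata extracted_text
  let cert := PySem.Str.isIn "certificate" joined || PySem.Str.isIn "occupancy" joined
  let rules : List (String × Bool) := [
    ("carbon_monoxide_detector_required", PySem.Str.isIn "carbon monoxide" joined || PySem.Str.isIn "co detector" joined),
    ("certificate_of_compliance_required", cert),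
    ("certificate_of_occupancy_required", cert),
    ("certificate_required_before_occupancy", cert),
    ("inspection_required", PySem.Str.isIn "inspect" joined),
    ("lead_based_paint_paperwork_required", PySem.Str.isIn "lead" joined),
    ("lead_clearance_required", PySem.Str.isIn "lead" joined),
    ("local_jurisdiction_document_required", false),
    ("pass_inspection_required", false),
    ("reinspection_required", false),
    ("rental_registration_required", PySem.Str.isIn "registration" joined),
    ("smoke_detector_required", PySem.Str.isIn "smoke" joined),
    ("utility_confirmation_required", PySem.Str.isIn "utility" joined)]
  (rules.filter (fun p => p.2 || base.contains p.1)).map (fun p => p.1)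

-- ===== PRECONDITION & SPEC =====
def Spec_document_rule_keys_py (category : String) (metadata : Option (List (String × String))) (extracted_text : Option String) (out : List String) : Prop := out = document_rule_keys_py_alt category metadata extracted_text
instance (category : String) (metadata : Option (List (String × String))) (extracted_text : Option String) (out : List String) : Decidable (Spec_document_rule_keys_py category metadata extracted_text out) := by unfold Spec_document_rule_keys_py; infer_instance

-- ===== CLAIM (what is proved, stated in full; the proofs are below) =====
def Claim_equal_document_rule_keys_py : Prop := ∀ (category : String) (metadata : Option (List (String × String))) (extracted_text : Option String), Dom_document_rule_keys_py category metadata extracted_text → Spec_document_rule_keys_py category metadata extracted_text (document_rule_keys_py category metadata extracted_text)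

-- ===== LEMMAS AND PROOFS =====

-- A's tail pipeline, abstracted over the base list and the seven text-trigger booleans
def pvCoreA (base : List String) (breg bcert butil blead bsmoke bco binsp : Bool) : List String :=
  let out := base
  let out := out ++ (if breg then ["rental_registration_required"] else [])
  let out := out ++ (if bcert then
      ["certificate_required_before_occupancy", "certificate_of_occupancy_required", "certificate_of_compliance_required"] else [])
  let out := out ++ (if butil then ["utility_confirmation_required"] else [])
  let out := out ++ (if blead then ["lead_based_paint_paperwork_required", "lead_clearance_required"] else [])
  let out := out ++ (if bsmoke then ["smoke_detector_required"] else [])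
  let out := out ++ (if bco then ["carbon_monoxide_detector_required"] else [])
  let out := out ++ (if binsp then ["inspection_required"] else [])
  PySem.List.sorted (PySem.Set.ofList (out.filter (fun k => k != ""))) (fun x => x.toList) false

-- B's tail pipeline under the same abstraction
def pvCoreB (base : List String) (breg bcert butil blead bsmoke bco binsp : Bool) : List String :=
  let rules : List (String × Bool) := [
    ("carbon_monoxide_detector_required", bco),
    ("certificate_of_compliance_required", bcert),
    ("certificate_of_occupancy_required", bcert),
    ("certificate_required_before_occupancy", bcert),
    ("inspection_required", binsp),
    ("lead_based_paint_paperwork_required", blead),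
    ("lead_clearance_required", blead),
    ("local_jurisdiction_document_required", false),
    ("pass_inspection_required", false),
    ("reinspection_required", false),
    ("rental_registration_required", breg),
    ("smoke_detector_required", bsmoke),
    ("utility_confirmation_required", butil)]
  (rules.filter (fun p => p.2 || base.contains p.1)).map (fun p => p.1)

lemma pvA_as_core (category : String) (metadata : Option (List (String × String))) (extracted_text : Option String) :
    document_rule_keys_py category metadata extracted_text =
      pvCoreA (pvBase category)
        (PySem.Str.isIn "registration" (pvJoined category metadata extracted_text))
        (PySem.Str.isIn "certificate" (pvJoined category metadata extracted_text) || PySem.Str.isIn "occupancy" (pvJoined category metadata extracted_text))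
        (PySem.Str.isIn "utility" (pvJoined category metadata extracted_text))
        (PySem.Str.isIn "lead" (pvJoined category metadata extracted_text))
        (PySem.Str.isIn "smoke" (pvJoined category metadata extracted_text))
        (PySem.Str.isIn "carbon monoxide" (pvJoined category metadata extracted_text) || PySem.Str.isIn "co detector" (pvJoined category metadata extracted_text))
        (PySem.Str.isIn "inspect" (pvJoined category metadata extracted_text)) := rfl

lemma pvB_as_core (category : String) (metadata : Option (List (String × String))) (extracted_text : Option String) :
    document_rule_keys_py_alt category metadata extracted_text =
      pvCoreB (pvBase category)
        (PySem.Str.isIn "registration" (pvJoined category metadata extracted_text))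
        (PySem.Str.isIn "certificate" (pvJoined category metadata extracted_text) || PySem.Str.isIn "occupancy" (pvJoined category metadata extracted_text))
        (PySem.Str.isIn "utility" (pvJoined category metadata extracted_text))
        (PySem.Str.isIn "lead" (pvJoined category metadata extracted_text))
        (PySem.Str.isIn "smoke" (pvJoined category metadata extracted_text))
        (PySem.Str.isIn "carbon monoxide" (pvJoined category metadata extracted_text) || PySem.Str.isIn "co detector" (pvJoined category metadata extracted_text))
        (PySem.Str.isIn "inspect" (pvJoined category metadata extracted_text)) := rfl

-- any dict lookup with a default yields the default or one of the dict's values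
lemma pvDict_getD_mem {κ ν : Type} [BEq κ] (d : PySem.Dict κ ν) (k : κ) (v : ν) :
    PySem.Dict.getD d k v ∈ v :: PySem.Dict.values d := by
  obtain ⟨items⟩ := d
  induction items with
  | nil => simp [PySem.Dict.getD, PySem.Dict.get?, PySem.Dict.values]
  | cons p rest ih =>
    simp only [PySem.Dict.getD, PySem.Dict.get?, PySem.Dict.values,
      List.find?_cons] at ih ⊢
    by_cases h : (p.1 == k) = true
    · simp [h]
    · simp only [h, Bool.false_eq_true] at *
      rcases List.mem_cons.mp ih with h' | h' <;> simp [h']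

lemma pvBase_mem (category : String) : pvBase category ∈ ([] : List String) :: PySem.Dict.values pvDocMap :=
  pvDict_getD_mem pvDocMap _ []

-- the two pipelines agree for every reachable base list and every trigger combination
lemma pvCore_eq : ∀ base ∈ ([] : List String) :: PySem.Dict.values pvDocMap,
    ∀ breg bcert butil blead bsmoke bco binsp : Bool,
      pvCoreA base breg bcert butil blead bsmoke bco binsp =
        pvCoreB base breg bcert butil blead bsmoke bco binsp := by decide

-- ===== VERDICT (by name: the statement is the Claim_ definition above) =====
theorem document_rule_keys_py_spec : Claim_equal_document_rule_keys_py := by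
  intro category metadata extracted_text _
  unfold Spec_document_rule_keys_py
  rw [pvA_as_core, pvB_as_core]
  exact pvCore_eq _ (pvBase_mem category) _ _ _ _ _ _ _
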